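-- pv_equiv track=rewrite | github.com/madhavshaury/ajio-stock-analyzer | app.py | _visible_columns_from_preset
-- ===== SOURCE A (Python) =====
-- _PRESET_CORE_KEYS = (
--     "parentOrderCode",
--     "erp_status",
--     "article_code",
--     "warehouse",
--     "failure_category",
--     "po_lookup_eligible",
-- )
--
-- def _visible_columns_from_preset(preset: str, all_cols: list[str]) -> list[str]:
--     """Map preset label to an ordered subset of columns (all must exist in all_cols)."""
--     ac = list(all_cols)
--     erp_like = [
--         c
--         for c in ac
--         if c.startswith(("erp_", "open_po")) or c == "erpnext_lookup_error"
--     ]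
--     if preset == "All columns":
--         return ac
--     if preset == "Core":
--         out = [c for c in _PRESET_CORE_KEYS if c in ac]
--         return out or ac
--     if preset == "Core + ERP":
--         seen: list[str] = []
--         for c in _PRESET_CORE_KEYS:
--             if c in ac and c not in seen:
--                 seen.append(c)
--         for c in erp_like:
--             if c not in seen:
--                 seen.append(c)
--         for c in ac:
--             if c not in seen:
--                 seen.append(c)
--         return seen or ac
--     return ac
-- ===== SOURCE B (Python) =====
-- _PRESET_CORE_KEYS = (
--     "parentOrderCode",
--     "erp_status",
--     "article_code",
--     "warehouse",
--     "failure_category",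
--     "po_lookup_eligible",
-- )
--
-- def _visible_columns_from_preset(preset: str, all_cols: list[str]) -> list[str]:
--     """Map preset label to an ordered subset of columns (all must exist in all_cols)."""
--     ac = list(all_cols)
--     if preset == "All columns":
--         return ac
--     if preset == "Core":
--         out = [c for c in _PRESET_CORE_KEYS if c in ac]
--         return out or ac
--     if preset == "Core + ERP":
--         uniq = list(dict.fromkeys(ac))
--
--         def rank(c):
--             if c in _PRESET_CORE_KEYS:
--                 return (0, _PRESET_CORE_KEYS.index(c))
--             if c.startswith(("erp_", "open_po")) or c == "erpnext_lookup_error":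
--                 return (1, uniq.index(c))
--             return (2, uniq.index(c))
--
--         return sorted(uniq, key=rank) or ac
--     return ac
-- ===== Notes on version B (the rewrite author's own statement) =====
-- stated objective: alternative
-- what changed: The 'Core + ERP' branch's three sequential membership-guarded append loops are replaced by de-duplicating the column list once (dict.fromkeys) and doing a single stable sort with a (group, position) priority key: core keys ranked by their position in _PRESET_CORE_KEYS, then erp-like columns, then the rest by first-occurrence order.
import Mathlib
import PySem

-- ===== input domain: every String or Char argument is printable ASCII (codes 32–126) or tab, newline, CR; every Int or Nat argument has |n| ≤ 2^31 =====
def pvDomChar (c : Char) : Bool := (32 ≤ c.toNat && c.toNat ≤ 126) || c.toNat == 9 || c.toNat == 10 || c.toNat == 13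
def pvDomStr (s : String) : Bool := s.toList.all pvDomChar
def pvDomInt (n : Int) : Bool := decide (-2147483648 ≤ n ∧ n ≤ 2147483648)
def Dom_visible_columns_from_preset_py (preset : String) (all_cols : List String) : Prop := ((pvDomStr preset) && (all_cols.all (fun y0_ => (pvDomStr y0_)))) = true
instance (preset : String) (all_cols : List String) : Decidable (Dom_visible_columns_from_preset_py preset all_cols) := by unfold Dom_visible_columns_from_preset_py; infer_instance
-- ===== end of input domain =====

-- B replaces the three membership-guarded append loops of A's "Core + ERP" branch by a
-- rank-and-stable-sort over the de-duplicated column list (objective: alternative).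

-- module constant _PRESET_CORE_KEYS (shared by both Pythons)
def pvCoreKeys : List String :=
  ["parentOrderCode", "erp_status", "article_code", "warehouse", "failure_category", "po_lookup_eligible"]

-- the erp-like test: c.startswith(("erp_", "open_po")) or c == "erpnext_lookup_error" (used by both Pythons)
def pvErpP (c : String) : Bool :=
  PySem.Str.startswith c "erp_" || PySem.Str.startswith c "open_po" || c == "erpnext_lookup_error"

-- ===== PORT A =====
def visible_columns_from_preset_py (preset : String) (all_cols : List String) : List String :=
  let ac := all_cols
  let erp_like := ac.filter pvErpP
  if preset == "All columns" then ac
  else if preset == "Core" then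
    let out := pvCoreKeys.filter (fun c => ac.contains c)
    if out.isEmpty then ac else out
  else if preset == "Core + ERP" then
    let seen1 := pvCoreKeys.foldl (fun s c => if ac.contains c && !s.contains c then s ++ [c] else s) []
    let seen2 := erp_like.foldl (fun s c => if !s.contains c then s ++ [c] else s) seen1
    let seen3 := ac.foldl (fun s c => if !s.contains c then s ++ [c] else s) seen2
    if seen3.isEmpty then ac else seen3
  else ac

-- ===== PORT B =====
-- rank(c) = (pvRank1 c, pvRank2 uniq c): core keys first (in core-key order), then erp-like
-- columns, then the rest (the latter two in first-occurrence order); Python's list.index is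
-- ported as index? ... .getD 0 (B only evaluates it on members, where .index returns).
def pvRank1 (c : String) : Int :=
  if pvCoreKeys.contains c then 0 else if pvErpP c then 1 else 2

def pvRank2 (uniq : List String) (c : String) : Int :=
  if pvCoreKeys.contains c then ((PySem.List.index? pvCoreKeys c).getD 0 : Nat)
  else ((PySem.List.index? uniq c).getD 0 : Nat)

def visible_columns_from_preset_py_alt (preset : String) (all_cols : List String) : List String :=
  let ac := all_cols
  if preset == "All columns" then ac
  else if preset == "Core" then
    let out := pvCoreKeys.filter (fun c => ac.contains c)
    if out.isEmpty then ac else out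
  else if preset == "Core + ERP" then
    let uniq := PySem.List.dedup ac
    let r := PySem.List.sorted2 uniq pvRank1 (pvRank2 uniq)
    if r.isEmpty then ac else r
  else ac

-- ===== PRECONDITION & SPEC =====
def Spec_visible_columns_from_preset_py (preset : String) (all_cols : List String) (out : List String) : Prop := out = visible_columns_from_preset_py_alt preset all_cols
instance (preset : String) (all_cols : List String) (out : List String) : Decidable (Spec_visible_columns_from_preset_py preset all_cols out) := by unfold Spec_visible_columns_from_preset_py; infer_instance

-- ===== CLAIM (what is proved, stated in full; the proofs are below) =====
def Claim_equal_visible_columns_from_preset_py : Prop := ∀ (preset : String) (all_cols : List String), Dom_visible_columns_from_preset_py preset all_cols → Spec_visible_columns_from_preset_py preset all_cols (visible_columns_from_preset_py preset all_cols)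

-- ===== LEMMAS AND PROOFS =====

-- A's dedup-append step is Python set-style add
theorem pvG_eq_add : (fun (s : List String) c => if !s.contains c then s ++ [c] else s) = PySem.Set.add := by
  funext s c
  simp [PySem.Set.add, PySem.Set.contains]

-- decomposition of the dedup fold over an arbitrary accumulator
theorem pv_foldl_add (xs : List String) : ∀ init : List String,
    xs.foldl PySem.Set.add init = init ++ (xs.foldl PySem.Set.add []).filter (fun c => !init.contains c) := by
  induction xs with
  | nil => intro init; simp
  | cons c xs ih =>
    intro init
    have hc0 : PySem.Set.add ([] : List String) c = [c] := by simp [PySem.Set.add, PySem.Set.contains]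
    simp only [List.foldl_cons, hc0]
    rw [ih (PySem.Set.add init c), ih [c], List.filter_append, List.filter_filter]
    by_cases h : init.contains c
    · have hadd : PySem.Set.add init c = init := by rw [PySem.Set.add, PySem.Set.contains, if_pos h]
      rw [hadd]
      have h1 : ([c].filter (fun d => !init.contains d)) = [] := by
        simp only [List.filter_cons, List.filter_nil, h, Bool.not_true]
        simp
      rw [h1]
      have h2 : ∀ d ∈ xs.foldl PySem.Set.add [], (!init.contains d) = ((!init.contains d) && !([c].contains d)) := by
        intro d _
        by_cases hd : d = c
        · subst hd; simp [List.contains_iff_mem.mp h]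
        · simp [hd]
      rw [List.filter_congr h2]
      simp [Bool.and_comm]
    · have hadd : PySem.Set.add init c = init ++ [c] := by rw [PySem.Set.add, PySem.Set.contains, if_neg h]
      rw [hadd]
      have h1 : ([c].filter (fun d => !init.contains d)) = [c] := by
        simp only [List.filter_cons, List.filter_nil, h, Bool.not_false]
        simp
      rw [h1, List.append_assoc]
      congr 2
      apply List.filter_congr
      intro d _
      simp [Bool.and_comm]

-- a nodup list dedups to itself
theorem pv_foldl_add_nodup (l : List String) (h : l.Nodup) : l.foldl PySem.Set.add [] = l := by
  induction l with
  | nil => simp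
  | cons c xs ih =>
    have hn := List.nodup_cons.mp h
    have hc0 : PySem.Set.add ([] : List String) c = [c] := by simp [PySem.Set.add, PySem.Set.contains]
    rw [List.foldl_cons, hc0, pv_foldl_add xs [c], ih hn.2]
    have : xs.filter (fun d => !([c].contains d)) = xs := by
      apply List.filter_eq_self.mpr
      intro d hd
      have : d ≠ c := fun e => hn.1 (e ▸ hd)
      simp [this]
    rw [this]
    rfl

theorem pv_foldl_guard (p : String → Bool) (xs : List String) : ∀ init : List String,
    xs.foldl (fun s c => if p c && !s.contains c then s ++ [c] else s) init
      = (xs.filter p).foldl PySem.Set.add init := by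
  induction xs with
  | nil => intro init; rfl
  | cons c xs ih =>
    intro init
    rw [List.foldl_cons, List.filter_cons]
    by_cases hp : p c
    · simp only [hp, Bool.true_and, if_true, List.foldl_cons, ih]
      congr 1
      have hv : PySem.Set.add init c = if init.contains c = true then init else init ++ [c] := rfl
      rw [hv]
      simp
    · simp only [hp, Bool.false_and, if_neg, Bool.false_eq_true, not_false_iff, ih]

theorem pv_dedup_cons (c : String) (xs : List String) :
    PySem.List.dedup (c :: xs) = [c] ++ (PySem.List.dedup xs).filter (fun d => !([c].contains d)) := by
  show (c :: xs).foldl PySem.Set.add [] = _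
  have hc0 : PySem.Set.add ([] : List String) c = [c] := by simp [PySem.Set.add, PySem.Set.contains]
  rw [List.foldl_cons, hc0, pv_foldl_add xs [c]]
  rfl

theorem pv_dedup_filter (p : String → Bool) (xs : List String) :
    PySem.List.dedup (xs.filter p) = (PySem.List.dedup xs).filter p := by
  induction xs with
  | nil => rfl
  | cons c xs ih =>
    rw [List.filter_cons, pv_dedup_cons c xs, List.filter_append, List.filter_filter]
    by_cases hp : p c
    · simp only [hp, if_pos]
      rw [pv_dedup_cons c (xs.filter p), ih, List.filter_filter]
      congr 1
      · simp [hp]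
      · apply List.filter_congr; intro d _; rw [Bool.and_comm]
    · simp only [hp, Bool.false_eq_true, if_neg, not_false_iff, ih]
      have h1 : ([c].filter p) = [] := by simp [hp]
      rw [h1, List.nil_append]
      apply List.filter_congr
      intro d _
      by_cases hd : d = c
      · subst hd; simp [hp]
      · simp [hd]

theorem pv_pairwise_idx (l : List String) (h : l.Nodup) :
    l.Pairwise (fun a b => ((PySem.List.index? l a).getD 0 : Nat) < ((PySem.List.index? l b).getD 0 : Nat)) := by
  rw [List.pairwise_iff_getElem]
  intro i j hi hj hij
  have key : ∀ (k : Nat) (hk : k < l.length), PySem.List.index? l l[k] = some k := by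
    intro k hk
    rw [PySem.List.index?_eq_idxOf?, List.idxOf?_eq_some_iff]
    refine ⟨hk, rfl, ?_⟩
    intro j hj e
    have : j = k := (List.Nodup.getElem_inj_iff h).mp e
    omega
  rw [key i hi, key j hj]
  simpa using hij

theorem pv_sorted2_eq_sorted_lex {α : Type} (xs : List α) (k1 k2 : α → Int) :
    PySem.List.sorted2 xs k1 k2 = PySem.List.sorted xs (fun x => toLex (k1 x, k2 x)) := by
  unfold PySem.List.sorted2 PySem.List.sorted
  simp only [Bool.false_eq_true, reduceIte]
  have hb : (fun a b => decide (k1 a < k1 b) || (!decide (k1 b < k1 a) && decide (k2 a < k2 b)))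
      = (fun a b => decide ((toLex (k1 a, k2 a) : Lex (Int × Int)) < toLex (k1 b, k2 b))) := by
    funext a b
    rw [Bool.eq_iff_iff]
    simp only [Bool.or_eq_true, Bool.and_eq_true, Bool.not_eq_eq_eq_not, Bool.not_true,
      decide_eq_true_eq, decide_eq_false_iff_not, Prod.Lex.toLex_lt_toLex]
    constructor
    · rintro (h | ⟨h1, h2⟩)
      · exact Or.inl h
      · omega
    · rintro (h | ⟨h1, h2⟩)
      · exact Or.inl h
      · right; constructor
        · omega
        · exact h2
  rw [hb]
-- the heart: A's three "Core + ERP" loops produce exactly B's rank-sorted dedup list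
theorem pv_seen_eq (ac : List String) :
    ac.foldl (fun s c => if !s.contains c then s ++ [c] else s)
      ((ac.filter pvErpP).foldl (fun s c => if !s.contains c then s ++ [c] else s)
        (pvCoreKeys.foldl (fun s c => if ac.contains c && !s.contains c then s ++ [c] else s) []))
      = PySem.List.sorted2 (PySem.List.dedup ac) pvRank1 (pvRank2 (PySem.List.dedup ac)) := by
  have hUdef : PySem.List.dedup ac = ac.foldl PySem.Set.add [] := rfl
  set U := PySem.List.dedup ac with hU
  set C : List String := pvCoreKeys.filter (fun c => ac.contains c) with hC
  set E : List String := U.filter (fun c => !C.contains c && pvErpP c) with hE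
  set R : List String := U.filter (fun c => !((C ++ E).contains c)) with hR
  -- seen1 = C
  have h1 : pvCoreKeys.foldl (fun s c => if ac.contains c && !s.contains c then s ++ [c] else s) [] = C := by
    rw [pv_foldl_guard (fun c => ac.contains c) pvCoreKeys []]
    rw [pv_foldl_add_nodup _ (List.Nodup.filter _ (by decide : pvCoreKeys.Nodup))]
  -- seen2 = C ++ E
  have h2 : (ac.filter pvErpP).foldl (fun s c => if !s.contains c then s ++ [c] else s) C = C ++ E := by
    rw [pvG_eq_add, pv_foldl_add (ac.filter pvErpP) C]
    congr 1
    have : (ac.filter pvErpP).foldl PySem.Set.add [] = U.filter pvErpP := by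
      rw [show (ac.filter pvErpP).foldl PySem.Set.add [] = PySem.List.dedup (ac.filter pvErpP) from rfl,
        pv_dedup_filter]
    rw [this, List.filter_filter]
  -- seen3 = (C ++ E) ++ R
  have h3 : ac.foldl (fun s c => if !s.contains c then s ++ [c] else s) (C ++ E) = (C ++ E) ++ R := by
    rw [pvG_eq_add, pv_foldl_add ac (C ++ E), ← hUdef]
  rw [h1, h2, h3]
  -- now the sort side
  rw [pv_sorted2_eq_sorted_lex]
  -- membership facts
  have nU : U.Nodup := PySem.List.nodup_dedup ac
  have nC : C.Nodup := List.Nodup.filter _ (by decide : pvCoreKeys.Nodup)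
  have nE : E.Nodup := List.Nodup.filter _ nU
  have nR : R.Nodup := List.Nodup.filter _ nU
  have memC : ∀ a, a ∈ C → a ∈ pvCoreKeys ∧ a ∈ ac := by
    intro a ha
    rcases List.mem_filter.mp ha with ⟨h1', h2'⟩
    exact ⟨h1', List.contains_iff_mem.mp h2'⟩
  have memE : ∀ a, a ∈ E → a ∈ U ∧ a ∉ C ∧ pvErpP a = true := by
    intro a ha
    rcases List.mem_filter.mp ha with ⟨h1', h2'⟩
    rcases Bool.and_eq_true_iff.mp h2' with ⟨hna, hpa⟩
    refine ⟨h1', ?_, hpa⟩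
    intro hc
    rw [Bool.not_eq_eq_eq_not, Bool.not_true] at hna
    have := List.contains_iff_mem.mpr hc
    rw [hna] at this
    exact Bool.false_ne_true this
  have memR : ∀ a, a ∈ R → a ∈ U ∧ a ∉ C ∧ a ∉ E := by
    intro a ha
    rcases List.mem_filter.mp ha with ⟨h1', h2'⟩
    rw [Bool.not_eq_eq_eq_not, Bool.not_true, ← Bool.not_eq_true, List.contains_iff_mem] at h2'
    simp only [List.mem_append] at h2'
    exact ⟨h1', fun h => h2' (Or.inl h), fun h => h2' (Or.inr h)⟩
  have memUC : ∀ a, a ∈ C → a ∈ U := by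
    intro a ha
    exact (PySem.List.mem_dedup ac a).mpr (memC a ha).2
  -- a ∈ U not in C, erp → in E
  have toE : ∀ a, a ∈ U → a ∉ C → pvErpP a = true → a ∈ E := by
    intro a hu hc hp
    refine List.mem_filter.mpr ⟨hu, ?_⟩
    rw [Bool.and_eq_true_iff]
    exact ⟨by simp [hc], hp⟩
  have toR : ∀ a, a ∈ U → a ∉ C → a ∉ E → a ∈ R := by
    intro a hu hc he
    refine List.mem_filter.mpr ⟨hu, ?_⟩
    simp [hc, he]
  -- core-contains is false on E and R members
  have notCoreE : ∀ a, a ∈ U → a ∉ C → pvCoreKeys.contains a = false := by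
    intro a hu hc
    rw [← Bool.not_eq_true, List.contains_iff_mem]
    intro hk
    exact hc (List.mem_filter.mpr ⟨hk, List.contains_iff_mem.mpr ((PySem.List.mem_dedup ac a).mp hu)⟩)
  -- the permutation
  have hperm : ((C ++ E) ++ R).Perm U := by
    rw [List.perm_ext_iff_of_nodup ?_ nU]
    · intro a
      constructor
      · intro h
        simp only [List.mem_append] at h
        rcases h with (h | h) | h
        · exact memUC a h
        · exact (memE a h).1
        · exact (memR a h).1
      · intro hu
        by_cases hc : a ∈ C
        · simp [hc]
        · by_cases hp : pvErpP a
          · simp [toE a hu hc hp]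
          · have : a ∉ E := fun he => hp ((memE a he).2.2)
            simp [toR a hu hc this]
    · rw [List.nodup_append]
      refine ⟨List.nodup_append.mpr ⟨nC, nE, ?_⟩, nR, ?_⟩
      · intro a ha b hb e
        exact (memE b hb).2.1 (e ▸ ha)
      · intro a ha b hb e
        simp only [List.mem_append] at ha
        rcases ha with ha | ha
        · exact (memR b hb).2.1 (e ▸ ha)
        · exact (memR b hb).2.2 (e ▸ ha)
  -- pairwise strictly increasing keys
  have hpw : ((C ++ E) ++ R).Pairwise
      (fun a b => (toLex (pvRank1 a, pvRank2 U a) : Lex (Int × Int)) < toLex (pvRank1 b, pvRank2 U b)) := by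
    have kC : ∀ a ∈ C, pvRank1 a = 0 := by
      intro a ha
      have hcc : pvCoreKeys.contains a = true := List.contains_iff_mem.mpr (memC a ha).1
      show (if pvCoreKeys.contains a then (0:Int) else if pvErpP a then 1 else 2) = 0
      rw [hcc]
      simp
    have kE : ∀ a ∈ E, pvRank1 a = 1 := by
      intro a ha
      rcases memE a ha with ⟨hu, hc, hp⟩
      show (if pvCoreKeys.contains a then (0:Int) else if pvErpP a then 1 else 2) = 1
      rw [notCoreE a hu hc, hp]
      simp
    have kR : ∀ a ∈ R, pvRank1 a = 2 := by
      intro a ha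
      rcases memR a ha with ⟨hu, hc, he⟩
      have hp : pvErpP a = false := by
        rw [← Bool.not_eq_true]
        intro hp
        exact he (toE a hu hc hp)
      show (if pvCoreKeys.contains a then (0:Int) else if pvErpP a then 1 else 2) = 2
      rw [notCoreE a hu hc, hp]
      simp
    have k2C : ∀ a ∈ C, pvRank2 U a = ((PySem.List.index? pvCoreKeys a).getD 0 : Nat) := by
      intro a ha
      have hcc : pvCoreKeys.contains a = true := List.contains_iff_mem.mpr (memC a ha).1
      show (if pvCoreKeys.contains a then (((PySem.List.index? pvCoreKeys a).getD 0 : Nat) : Int) else ((PySem.List.index? U a).getD 0 : Nat)) = _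
      rw [hcc]
      simp
    have k2U : ∀ a, a ∈ U → a ∉ C → pvRank2 U a = ((PySem.List.index? U a).getD 0 : Nat) := by
      intro a hu hc
      show (if pvCoreKeys.contains a then (((PySem.List.index? pvCoreKeys a).getD 0 : Nat) : Int) else ((PySem.List.index? U a).getD 0 : Nat)) = _
      rw [notCoreE a hu hc]
      simp
    -- within-group orders
    have pwC : C.Pairwise (fun a b => ((PySem.List.index? pvCoreKeys a).getD 0 : Nat) < ((PySem.List.index? pvCoreKeys b).getD 0 : Nat)) :=
      List.Pairwise.filter _ (pv_pairwise_idx pvCoreKeys (by decide))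
    have pwU := pv_pairwise_idx U nU
    have pwE : E.Pairwise (fun a b => ((PySem.List.index? U a).getD 0 : Nat) < ((PySem.List.index? U b).getD 0 : Nat)) :=
      List.Pairwise.filter _ pwU
    have pwR : R.Pairwise (fun a b => ((PySem.List.index? U a).getD 0 : Nat) < ((PySem.List.index? U b).getD 0 : Nat)) :=
      List.Pairwise.filter _ pwU
    rw [List.append_assoc, List.pairwise_append]
    refine ⟨?_, ?_, ?_⟩
    · -- within C
      refine List.Pairwise.imp_of_mem ?_ pwC
      intro a b ha hb hlt
      rw [Prod.Lex.toLex_lt_toLex]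
      right
      refine ⟨by rw [kC a ha, kC b hb], ?_⟩
      rw [k2C a ha, k2C b hb]
      dsimp only
      exact_mod_cast hlt
    · rw [List.pairwise_append]
      refine ⟨?_, ?_, ?_⟩
      · refine List.Pairwise.imp_of_mem ?_ pwE
        intro a b ha hb hlt
        rw [Prod.Lex.toLex_lt_toLex]
        right
        refine ⟨by rw [kE a ha, kE b hb], ?_⟩
        rcases memE a ha with ⟨hua, hca, _⟩
        rcases memE b hb with ⟨hub, hcb, _⟩
        rw [k2U a hua hca, k2U b hub hcb]
        dsimp only
        exact_mod_cast hlt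
      · refine List.Pairwise.imp_of_mem ?_ pwR
        intro a b ha hb hlt
        rw [Prod.Lex.toLex_lt_toLex]
        right
        refine ⟨by rw [kR a ha, kR b hb], ?_⟩
        rcases memR a ha with ⟨hua, hca, _⟩
        rcases memR b hb with ⟨hub, hcb, _⟩
        rw [k2U a hua hca, k2U b hub hcb]
        dsimp only
        exact_mod_cast hlt
      · intro a ha b hb
        rw [Prod.Lex.toLex_lt_toLex]
        left
        rw [kE a ha, kR b hb]
        norm_num
    · intro a ha b hb
      rw [Prod.Lex.toLex_lt_toLex]
      left
      simp only [List.mem_append] at hb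
      rcases hb with hb | hb
      · rw [kC a ha, kE b hb]; norm_num
      · rw [kC a ha, kR b hb]; norm_num
  exact (PySem.List.sorted_eq_of_perm_of_pairwise_lt U ((C ++ E) ++ R) _ hperm hpw).symm

-- ===== VERDICT (by name: the statement is the Claim_ definition above) =====
theorem visible_columns_from_preset_py_spec : Claim_equal_visible_columns_from_preset_py := by
  intro preset ac _
  unfold Spec_visible_columns_from_preset_py visible_columns_from_preset_py visible_columns_from_preset_py_alt
  by_cases h1 : preset = "All columns" <;> by_cases h2 : preset = "Core" <;> by_cases h3 : preset = "Core + ERP" <;>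
    simp only [h1, h2, h3, beq_iff_eq, if_pos, reduceIte, pv_seen_eq ac]
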